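-- pv_equiv track=rewrite | github.com/stefanoconiglio/ramsey | the-hunt-for-facets/jump-space_v1/generate_circulant_tex.py | status_field_widths
-- ===== SOURCE A (Python) =====
-- def status_field_widths(entries: list[list[tuple[str, str]]]) -> list[int]:
--     if not entries:
--         return []
--     field_count = len(entries[0])
--     widths = [0 for _ in range(field_count)]
--     for fields in entries:
--         for idx, (label, value) in enumerate(fields):
--             widths[idx] = max(widths[idx], len(f"{label}={value}"))
--     return widths
-- ===== SOURCE B (Python) =====
-- def status_field_widths(entries: list[list[tuple[str, str]]]) -> list[int]:
--     return _fold([[len(f"{label}={value}") for label, value in row] for row in entries])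
--
--
-- def _fold(rows):
--     if not rows:
--         return []
--     if len(rows) == 1:
--         return rows[0]
--     mid = len(rows) // 2
--     return _merge(_fold(rows[:mid]), _fold(rows[mid:]))
--
--
-- def _merge(u, v):
--     if len(u) < len(v):
--         u, v = v, u
--     return [max(a, b) for a, b in zip(u, v)] + u[len(v):]
-- ===== Notes on version B (the rewrite author's own statement) =====
-- stated objective: alternative
-- what changed: Replaces A's row-by-row loop mutating an index-addressed widths accumulator with a two-stage divide-and-conquer: first map each row to its list of formatted widths, then recursively split the list of rows in half and merge the halves with an elementwise max (no indices, no preallocated accumulator).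
-- crash fix: A raises IndexError whenever some row is longer than the first row; B returns the per-column maxima over all columns present (list length = longest row) there. — e.g. on status_field_widths([[("a", "b")], [("c", "d"), ("e", "f")]]): A raises IndexError, B returns [3, 3]
import Mathlib
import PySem

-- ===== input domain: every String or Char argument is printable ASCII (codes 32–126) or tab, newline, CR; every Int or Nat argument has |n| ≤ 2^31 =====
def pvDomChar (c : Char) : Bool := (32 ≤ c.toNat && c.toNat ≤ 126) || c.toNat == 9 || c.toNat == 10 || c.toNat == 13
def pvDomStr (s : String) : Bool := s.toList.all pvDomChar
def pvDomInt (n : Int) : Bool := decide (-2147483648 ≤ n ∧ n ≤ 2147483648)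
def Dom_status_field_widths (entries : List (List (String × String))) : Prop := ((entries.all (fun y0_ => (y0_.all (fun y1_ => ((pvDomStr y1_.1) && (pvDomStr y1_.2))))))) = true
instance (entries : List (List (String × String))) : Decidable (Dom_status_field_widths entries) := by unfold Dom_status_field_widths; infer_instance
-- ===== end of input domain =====

-- B replaces A's row-by-row loop over an index-addressed mutable widths accumulator by a
-- two-stage divide-and-conquer: map each row to its width list, then recursively merge
-- halves with an elementwise max; same asymptotic cost, a genuinely different decomposition.

-- len(f"{label}={value}"): Python len counts code points = length of the char list (exact)
def fw (p : String × String) : Int := (p.1.toList.length : Int) + 1 + (p.2.toList.length : Int)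

-- ===== PORT A =====
-- one step of A's inner 'for idx, (label, value) in enumerate(fields)' loop;
-- 'widths[idx]' raises IndexError when idx ≥ len(widths) — those inputs are excluded by
-- Pre_status_field_widths, so the getD default is never read on admitted inputs
def aStep (w : List Int) (p : (String × String) × Nat) : List Int :=
  w.set p.2 (max (w.getD p.2 0) (fw p.1))

def status_field_widths (entries : List (List (String × String))) : List Int :=
  match entries with
  | [] => []
  | e0 :: _ =>
    entries.foldl (fun widths fields => fields.zipIdx.foldl aStep widths)
      (List.replicate e0.length 0)

-- ===== PORT B =====
-- Source B's _merge: swap so u is the longer list, zip truncates to the shorter, keep u's tail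
def bmerge (u v : List Int) : List Int :=
  let uv := if u.length < v.length then (v, u) else (u, v)
  List.zipWith max uv.1 uv.2 ++ uv.1.drop uv.2.length

-- Source B's _fold: recursive halving over the list of per-row width lists
def bfold : List (List Int) → List Int
  | [] => []
  | [w] => w
  | a :: b :: rest =>
    let ws := a :: b :: rest
    bmerge (bfold (ws.take (ws.length / 2))) (bfold (ws.drop (ws.length / 2)))
termination_by ws => ws.length
decreasing_by
  · simp; omega
  · simp; omega

def status_field_widths_alt (entries : List (List (String × String))) : List Int :=
  bfold (entries.map (fun row => row.map fw))

-- ===== PRECONDITION & SPEC =====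
-- Pre_ excludes exactly the inputs where A raises IndexError: a row longer than the first row
def Pre_status_field_widths (entries : List (List (String × String))) : Prop :=
  ∀ r ∈ entries, r.length ≤ (entries.headD []).length
instance (entries : List (List (String × String))) : Decidable (Pre_status_field_widths entries) := by unfold Pre_status_field_widths; infer_instance

def pvWitness_status_field_widths : (List (List (String × String))) :=
  [[("a", "b"), ("cc", "d")], [("e", "ff"), ("g", "h")]]

-- A raises IndexError when some row is longer than the first row; B returns the per-column
-- maxima over all columns present (list length = longest row) there.
def Raises_status_field_widths (entries : List (List (String × String))) : Prop :=
  ∃ r ∈ entries, (entries.headD []).length < r.length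
instance (entries : List (List (String × String))) : Decidable (Raises_status_field_widths entries) := by unfold Raises_status_field_widths; infer_instance
def pvRaiseWitness_status_field_widths : (List (List (String × String))) :=
  [[("a", "b")], [("c", "d"), ("e", "f")]]
def pvRaiseWitnessOut_status_field_widths : List Int := [3, 3]

def Spec_status_field_widths (entries : List (List (String × String))) (out : List Int) : Prop := out = status_field_widths_alt entries
instance (entries : List (List (String × String))) (out : List Int) : Decidable (Spec_status_field_widths entries out) := by unfold Spec_status_field_widths; infer_instance

-- ===== CLAIM (what is proved, stated in full; the proofs are below) =====
def Claim_equal_status_field_widths : Prop := ∀ (entries : List (List (String × String))), Dom_status_field_widths entries → Pre_status_field_widths entries → Spec_status_field_widths entries (status_field_widths entries)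

def Claim_raises_status_field_widths : Prop := (∀ (entries : List (List (String × String))), Dom_status_field_widths entries → Raises_status_field_widths entries → ¬ Pre_status_field_widths entries) ∧ (Dom_status_field_widths (pvRaiseWitness_status_field_widths) ∧ Raises_status_field_widths (pvRaiseWitness_status_field_widths) ∧ status_field_widths_alt (pvRaiseWitness_status_field_widths) = pvRaiseWitnessOut_status_field_widths)

-- ===== LEMMAS AND PROOFS =====

-- ---- A side: what one pass of A's inner loop does to the widths list ----
def mergeW : List Int → List (String × String) → List Int
  | v, [] => v
  | [], _ :: _ => []
  | a :: v, f :: fs => max a (fw f) :: mergeW v fs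

lemma set_oob : ∀ (w : List Int) (n : Nat) (c : Int), w.length ≤ n → w.set n c = w := by
  intro w
  induction w with
  | nil => intro n c _; rfl
  | cons a v ih =>
    intro n c h
    cases n with
    | zero => simp at h
    | succ m => simp [List.set, ih m c (by simpa using h)]

lemma dead_fold : ∀ (fs : List (String × String)) (n : Nat) (w : List Int), w.length ≤ n →
    (fs.zipIdx n).foldl aStep w = w := by
  intro fs
  induction fs with
  | nil => intro n w _; rfl
  | cons f fs ih =>
    intro n w h
    have hs : aStep w (f, n) = w := by simp [aStep, set_oob w n _ h]
    simp only [List.zipIdx_cons, List.foldl_cons, hs]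
    exact ih (n + 1) w (Nat.le_succ_of_le h)

lemma inner_fold : ∀ (fields : List (String × String)) (u v : List Int),
    (fields.zipIdx u.length).foldl aStep (u ++ v) = u ++ mergeW v fields := by
  intro fields
  induction fields with
  | nil => intro u v; simp [mergeW]
  | cons f fs ih =>
    intro u v
    cases v with
    | nil =>
      have hs : aStep (u ++ []) (f, u.length) = u := by
        simp [aStep, set_oob u u.length _ (le_refl _)]
      simp only [List.zipIdx_cons, List.foldl_cons, hs]
      simpa [mergeW] using dead_fold fs (u.length + 1) u (Nat.le_succ _)
    | cons a v' =>
      have hs : aStep (u ++ a :: v') (f, u.length) = u ++ (max a (fw f)) :: v' := by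
        simp [aStep]
      simp only [List.zipIdx_cons, List.foldl_cons, hs]
      have h1 : u.length + 1 = (u ++ [max a (fw f)]).length := by simp
      have h2 : u ++ (max a (fw f)) :: v' = (u ++ [max a (fw f)]) ++ v' := by simp
      rw [h1, h2, ih (u ++ [max a (fw f)]) v']
      simp [mergeW]

lemma rowStep_eq (w : List Int) (fields : List (String × String)) :
    fields.zipIdx.foldl aStep w = mergeW w fields := by
  simpa using inner_fold fields [] w

lemma mergeW_length : ∀ (v : List Int) (fields : List (String × String)),
    (mergeW v fields).length = v.length := by
  intro v
  induction v with
  | nil => intro fields; cases fields <;> rfl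
  | cons a v ih => intro fields; cases fields <;> simp [mergeW, ih]

lemma mergeW_getD : ∀ (v : List Int) (fields : List (String × String)) (j : Nat), j < v.length →
    (mergeW v fields).getD j 0 =
      if j < fields.length then max (v.getD j 0) (fw (fields.getD j ("", ""))) else v.getD j 0 := by
  intro v
  induction v with
  | nil => intro fields j h; simp at h
  | cons a v ih =>
    intro fields j h
    cases fields with
    | nil => simp [mergeW]
    | cons f fs =>
      cases j with
      | zero => simp [mergeW]
      | succ m => simpa [mergeW] using ih fs m (by simpa using h)

lemma foldMerge_length : ∀ (rows : List (List (String × String))) (w : List Int),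
    (rows.foldl mergeW w).length = w.length := by
  intro rows
  induction rows with
  | nil => intro w; rfl
  | cons r rs ih => intro w; simp [List.foldl_cons, ih, mergeW_length]

lemma foldMerge_getD : ∀ (rows : List (List (String × String))) (w : List Int) (j : Nat),
    j < w.length →
    (rows.foldl mergeW w).getD j 0 =
      rows.foldl (fun m row => if j < row.length then max m (fw (row.getD j ("", ""))) else m)
        (w.getD j 0) := by
  intro rows
  induction rows with
  | nil => intro w j _; rfl
  | cons r rs ih =>
    intro w j hj
    have hj' : j < (mergeW w r).length := by simpa [mergeW_length] using hj
    simp only [List.foldl_cons]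
    rw [ih (mergeW w r) j hj', mergeW_getD w r j hj]

lemma fw_nonneg (p : String × String) : 0 ≤ fw p := by
  unfold fw; positivity

-- ---- B side: bfold as a structural right fold of an elementwise max ----
def m2 : List Int → List Int → List Int
  | [], v => v
  | u, [] => u
  | a :: u, b :: v => max a b :: m2 u v

lemma m2_nil_right : ∀ u : List Int, m2 u [] = u := by
  intro u; cases u <;> rfl

lemma bmerge_eq_aux : ∀ (u v : List Int), v.length ≤ u.length →
    List.zipWith max u v ++ u.drop v.length = m2 u v := by
  intro u
  induction u with
  | nil =>
    intro v h
    have : v = [] := List.eq_nil_of_length_eq_zero (Nat.le_zero.mp (by simpa using h))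
    simp [this, m2]
  | cons a u ih =>
    intro v h
    cases v with
    | nil => simp [m2]
    | cons b v => simp [m2, ih v (by simpa using h)]

lemma m2_comm : ∀ u v : List Int, m2 u v = m2 v u := by
  intro u
  induction u with
  | nil => intro v; simp [m2, m2_nil_right]
  | cons a u ih =>
    intro v
    cases v with
    | nil => rfl
    | cons b v => simp [m2, ih, max_comm]

lemma bmerge_eq (u v : List Int) : bmerge u v = m2 u v := by
  unfold bmerge
  by_cases h : u.length < v.length
  · simp only [h, if_true]
    rw [bmerge_eq_aux v u (le_of_lt h), m2_comm]
  · simp only [h, if_false]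
    exact bmerge_eq_aux u v (le_of_not_gt h)

lemma m2_assoc : ∀ u v w : List Int, m2 (m2 u v) w = m2 u (m2 v w) := by
  intro u
  induction u with
  | nil => intro v w; simp [m2]
  | cons a u ih =>
    intro v w
    cases v with
    | nil => simp [m2]
    | cons b v =>
      cases w with
      | nil => simp [m2, m2_nil_right]
      | cons c w => simp [m2, ih, max_assoc]

lemma foldr_m2_append : ∀ (u v : List (List Int)),
    (u ++ v).foldr m2 [] = m2 (u.foldr m2 []) (v.foldr m2 []) := by
  intro u v
  induction u with
  | nil => simp [m2]
  | cons a u ih => simp [List.foldr_cons, ih, m2_assoc]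

lemma bfold_eq_foldr : ∀ ws : List (List Int), bfold ws = ws.foldr m2 []
  | [] => by simp [bfold]
  | [w] => by simp [bfold, m2_nil_right]
  | a :: b :: rest => by
    rw [bfold, bmerge_eq, bfold_eq_foldr _, bfold_eq_foldr _, ← foldr_m2_append]
    simp
termination_by ws => ws.length
decreasing_by
  · simp; omega
  · simp; omega

lemma m2_length : ∀ u v : List Int, (m2 u v).length = max u.length v.length := by
  intro u
  induction u with
  | nil => intro v; simp [m2]
  | cons a u ih =>
    intro v
    cases v with
    | nil => simp [m2]
    | cons b v => simp [m2, ih, Nat.succ_max_succ]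

def nn (u : List Int) : Prop := ∀ x ∈ u, 0 ≤ x

lemma getD_nonneg (u : List Int) (hu : nn u) (j : Nat) : 0 ≤ u.getD j 0 := by
  rcases Nat.lt_or_ge j u.length with h | h
  · rw [List.getD_eq_getElem u 0 h]; exact hu _ (List.getElem_mem h)
  · rw [List.getD_eq_default u 0 h]

lemma m2_nn (u v : List Int) (hu : nn u) (hv : nn v) : nn (m2 u v) := by
  induction u generalizing v with
  | nil => simpa [m2] using hv
  | cons a u ih =>
    cases v with
    | nil => simpa [m2_nil_right] using hu
    | cons b v =>
      intro x hx
      simp only [m2, List.mem_cons] at hx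
      rcases hx with rfl | hx
      · exact le_max_of_le_left (hu a (by simp))
      · exact ih v (fun y hy => hu y (List.mem_cons_of_mem _ hy))
          (fun y hy => hv y (List.mem_cons_of_mem _ hy)) x hx

lemma m2_getD (u v : List Int) (hu : nn u) (hv : nn v) (j : Nat) :
    (m2 u v).getD j 0 = max (u.getD j 0) (v.getD j 0) := by
  induction u generalizing v j with
  | nil =>
    simp only [m2, List.getD_nil]
    exact (max_eq_right (getD_nonneg v hv j)).symm
  | cons a u ih =>
    cases v with
    | nil =>
      rw [m2_nil_right]
      simp only [List.getD_nil]
      exact (max_eq_left (getD_nonneg _ hu j)).symm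
    | cons b v =>
      cases j with
      | zero => simp [m2]
      | succ m =>
        simpa [m2] using ih v (fun y hy => hu y (List.mem_cons_of_mem _ hy))
          (fun y hy => hv y (List.mem_cons_of_mem _ hy)) m

lemma foldr_m2_nn (ws : List (List Int)) (h : ∀ w ∈ ws, nn w) : nn (ws.foldr m2 []) := by
  induction ws with
  | nil => intro x hx; simp at hx
  | cons w ws ih =>
    exact m2_nn w _ (h w (by simp)) (ih (fun u hu => h u (by simp [hu])))

lemma foldr_m2_getD (ws : List (List Int)) (h : ∀ w ∈ ws, nn w) (j : Nat) :
    (ws.foldr m2 []).getD j 0 = ws.foldr (fun w m => max (w.getD j 0) m) 0 := by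
  induction ws with
  | nil => simp
  | cons w ws ih =>
    simp only [List.foldr_cons]
    rw [m2_getD w _ (h w (by simp)) (foldr_m2_nn ws (fun u hu => h u (by simp [hu]))) j,
      ih (fun u hu => h u (by simp [hu]))]

lemma foldr_m2_length (ws : List (List Int)) :
    (ws.foldr m2 []).length = ws.foldr (fun w m => max w.length m) 0 := by
  induction ws with
  | nil => rfl
  | cons w ws ih => simp [List.foldr_cons, m2_length, ih]

lemma rowW_getD (row : List (String × String)) (j : Nat) :
    (row.map fw).getD j 0 = if j < row.length then fw (row.getD j ("", "")) else 0 := by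
  rcases Nat.lt_or_ge j row.length with h | h
  · rw [List.getD_eq_getElem _ 0 (by simpa using h), List.getD_eq_getElem _ _ h]
    simp [h]
  · rw [List.getD_eq_default _ 0 (by simpa using h), List.getD_eq_default _ _ h]
    simp [Nat.not_lt.mpr h]

-- ---- bridging the two per-column folds ----
lemma foldr_max_init : ∀ (xs : List Int) (a b : Int),
    xs.foldr max (max a b) = max a (xs.foldr max b) := by
  intro xs
  induction xs with
  | nil => intro a b; rfl
  | cons c xs ih =>
    intro a b
    simp only [List.foldr_cons, ih]
    rw [max_left_comm]

lemma foldl_max_eq_foldr : ∀ (xs : List Int) (a : Int), xs.foldl max a = xs.foldr max a := by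
  intro xs
  induction xs with
  | nil => intro a; rfl
  | cons x xs ih =>
    intro a
    simp only [List.foldl_cons, List.foldr_cons]
    rw [ih, max_comm a x, foldr_max_init]

lemma colA_eq_foldl_max (rows : List (List (String × String))) (j : Nat) :
    ∀ m : Int, 0 ≤ m →
    rows.foldl (fun m row => if j < row.length then max m (fw (row.getD j ("", ""))) else m) m
      = (rows.map (fun row => (row.map fw).getD j 0)).foldl max m := by
  induction rows with
  | nil => intro m _; rfl
  | cons r rs ih =>
    intro m hm
    simp only [List.foldl_cons, List.map_cons]
    rw [rowW_getD]
    by_cases h : j < r.length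
    · simp only [h, if_true]
      exact ih _ (le_trans hm (le_max_left _ _))
    · simp only [h, if_false, max_eq_left hm]
      exact ih m hm

-- ===== VERDICT (by name: the statement is the Claim_ definition above) =====
theorem status_field_widths_spec : Claim_equal_status_field_widths := by
  intro entries _ hpre
  unfold Spec_status_field_widths status_field_widths_alt
  rw [bfold_eq_foldr]
  cases entries with
  | nil => rfl
  | cons e0 rest =>
    unfold status_field_widths
    simp only [rowStep_eq]
    have hnn : ∀ w ∈ (e0 :: rest).map (fun row => row.map fw), nn w := by
      intro w hw
      obtain ⟨row, _, rfl⟩ := List.mem_map.mp hw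
      intro x hx
      obtain ⟨p, _, rfl⟩ := List.mem_map.mp hx
      exact fw_nonneg p
    apply List.ext_getElem
    · rw [foldMerge_length, foldr_m2_length]
      simp only [List.length_replicate, List.foldr_map]
      have hle : ∀ ws : List (List (String × String)), (∀ r ∈ ws, r.length ≤ e0.length) →
          ws.foldr (fun w m => max w.length m) 0 ≤ e0.length := by
        intro ws
        induction ws with
        | nil => intro _; simp
        | cons r rs ih =>
          intro h
          simp only [List.foldr_cons]
          exact max_le (h r (by simp)) (ih (fun u hu => h u (by simp [hu])))
      have h1 : (e0 :: rest).foldr (fun w m => max (w.map fw).length m) 0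
          = (e0 :: rest).foldr (fun w m => max w.length m) 0 := by
        simp
      rw [h1]
      have hub := hle (e0 :: rest) (by intro r hr; simpa using hpre r hr)
      have hlb : e0.length ≤ (e0 :: rest).foldr (fun w m => max w.length m) 0 := by
        simp only [List.foldr_cons]
        exact le_max_left _ _
      omega
    · intro j h1 h2
      have hj : j < e0.length := by rw [foldMerge_length] at h1; simpa using h1
      have hjr : j < (List.replicate e0.length (0 : Int)).length := by simpa using hj
      rw [← List.getD_eq_getElem _ 0 h1, ← List.getD_eq_getElem _ 0 h2]
      rw [foldMerge_getD _ _ j hjr, foldr_m2_getD _ hnn j]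
      have : (List.replicate e0.length (0:Int)).getD j 0 = 0 := by simp
      rw [this, colA_eq_foldl_max _ j 0 (le_refl 0), foldl_max_eq_foldr]
      simp [List.foldr_map]

def status_field_widths_raises : Claim_raises_status_field_widths := by
  unfold Claim_raises_status_field_widths
  constructor
  · intro entries _ hr hpre
    obtain ⟨r, hmem, hlt⟩ := hr
    exact absurd (hpre r hmem) (not_le.mpr hlt)
  · refine ⟨by decide, ⟨[("c", "d"), ("e", "f")], by decide, by decide⟩, ?_⟩
    unfold status_field_widths_alt
    rw [bfold_eq_foldr]
    decide
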